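-- pv_equiv track=rewrite | github.com/tallgran/conifer-percyfal-ms | src/conifer/tools/partition_bed.py | greedy_partition
-- ===== SOURCE A (Python) =====
-- def greedy_partition(regions, npartitions, partition):
--     # Sort regions by length
--     ix = sorted(
--         range(len(regions)), key=lambda k: len(regions[k]), reverse=True
--     )
--     # Seed output regions with npartitions longest regions
--     out = [[regions[i]] for i in ix[0:npartitions]]
--     # Keep track of output lengths
--     outlen = [len(r[0]) for r in out]
--     for j in ix[npartitions : len(ix)]:  # noqa: E203
--         # Get index of output set with shortest total region length
--         # and add current region
--         imin = outlen.index(min(outlen))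
--         out[imin].append(regions[j])
--         outlen[imin] += len(regions[j])
--     return out
-- ===== SOURCE B (Python) =====
-- def _insort(queue, item):
--     # insert item into the ascending-sorted queue, keeping it sorted
--     pos = 0
--     while pos < len(queue) and queue[pos] < item:
--         pos += 1
--     queue.insert(pos, item)
--
--
-- def greedy_partition(regions, npartitions, partition):
--     # Longest-first order of the regions themselves (stable on ties)
--     order = sorted(regions, key=len, reverse=True)
--     k = min(npartitions, len(order))
--     # Seed one partition per region among the k longest, and build a
--     # priority queue of (total length, partition index), kept sorted
--     out = []
--     queue = []
--     for i, s in enumerate(order[:k]):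
--         out.append([s])
--         _insort(queue, (len(s), i))
--     # Each remaining region goes to the front of the queue: the
--     # partition with the smallest (total length, index)
--     for s in order[k:]:
--         tot, i = queue.pop(0)
--         out[i].append(s)
--         _insort(queue, (tot + len(s), i))
--     return out
-- ===== Notes on version B (the rewrite author's own statement) =====
-- stated objective: alternative
-- what changed: A rescans the whole outlen list with min()+index() for every region; B sorts the regions themselves and maintains a priority queue of (total length, partition index) pairs kept in ascending order, popping the front and re-inserting in order, so the per-region min/index scans disappear.
import Mathlib
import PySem

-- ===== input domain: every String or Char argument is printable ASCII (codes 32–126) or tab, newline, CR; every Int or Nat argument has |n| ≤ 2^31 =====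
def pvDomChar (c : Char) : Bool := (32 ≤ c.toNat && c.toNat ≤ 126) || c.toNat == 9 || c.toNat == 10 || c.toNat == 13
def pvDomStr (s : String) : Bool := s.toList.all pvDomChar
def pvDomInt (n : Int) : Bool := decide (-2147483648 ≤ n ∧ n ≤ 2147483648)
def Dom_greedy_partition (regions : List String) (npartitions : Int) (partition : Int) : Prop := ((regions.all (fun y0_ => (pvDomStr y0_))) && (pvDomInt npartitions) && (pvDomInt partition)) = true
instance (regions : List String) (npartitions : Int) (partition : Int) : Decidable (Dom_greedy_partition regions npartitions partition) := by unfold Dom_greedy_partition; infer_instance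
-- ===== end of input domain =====

-- B replaces A's per-region scan for the shortest partition (min + index over outlen)
-- by a priority queue of (total length, partition index) pairs kept sorted ascending
-- (pop the front, re-insert in order); equal return value, a different data structure.
-- Neither implementation mutates its arguments.

-- ===== PORT A =====
-- The loop body of A (verbatim: index of the shortest output set, append, update lengths)
def pvStepA (st : List (List String) × List Int) (s : String) :
    List (List String) × List Int :=
  let imin := (PySem.List.index? st.2 ((PySem.List.min? st.2 (fun x => x)).getD 0)).getD 0
  (PySem.List.pySetD st.1 (imin : Int) (PySem.List.pyGetD st.1 (imin : Int) [] ++ [s]),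
   PySem.List.pySetD st.2 (imin : Int) (PySem.List.pyGetD st.2 (imin : Int) 0 + PySem.Str.len s))

def greedy_partition (regions : List String) (npartitions : Int) (partition : Int) : List (List String) :=
  -- ix = sorted(range(len(regions)), key=lambda k: len(regions[k]), reverse=True)
  let ix := PySem.List.sorted (PySem.List.pyRange 0 (PySem.List.len regions) 1)
      (fun k => PySem.Str.len (PySem.List.pyGetD regions k "")) true
  -- out = [[regions[i]] for i in ix[0:npartitions]]
  let out := (PySem.List.slice ix (some 0) (some npartitions)).map
      (fun i => [PySem.List.pyGetD regions i ""])
  -- outlen = [len(r[0]) for r in out]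
  let outlen := out.map (fun r => PySem.Str.len (PySem.List.pyGetD r 0 ""))
  -- for j in ix[npartitions : len(ix)]: …   (pvStepA above is the loop body)
  let st := (PySem.List.slice ix (some npartitions) (some (PySem.List.len ix))).foldl
      (fun st j => pvStepA st (PySem.List.pyGetD regions j "")) (out, outlen)
  st.1

-- ===== PORT B =====
-- _insort(queue, item): insert item into the ascending-sorted queue, keeping it sorted
-- (the if-condition is Python's tuple comparison q < item, i.e. pvPairLt q item)
def pvInsort (queue : List (Int × Int)) (item : Int × Int) : List (Int × Int) :=
  match queue with
  | [] => [item]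
  | q :: qs =>
    if q.1 < item.1 ∨ (q.1 = item.1 ∧ q.2 < item.2) then q :: pvInsort qs item
    else item :: q :: qs


-- The second loop body of B (verbatim: pop the front of the queue, append, re-insert)
def pvStepB (st : List (List String) × List (Int × Int)) (s : String) :
    List (List String) × List (Int × Int) :=
  let ti := st.2.headD (0, 0)
  (PySem.List.pySetD st.1 ti.2 (PySem.List.pyGetD st.1 ti.2 [] ++ [s]),
   pvInsort st.2.tail (ti.1 + PySem.Str.len s, ti.2))

def greedy_partition_alt (regions : List String) (npartitions : Int) (partition : Int) : List (List String) :=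
  -- order = sorted(regions, key=len, reverse=True)
  let order := PySem.List.sorted regions (fun s => PySem.Str.len s) true
  -- k = min(npartitions, len(order))
  let k := min npartitions (PySem.List.len order)
  -- for i, s in enumerate(order[:k]): out.append([s]); _insort(queue, (len(s), i))
  let st1 := (PySem.List.enumerate (PySem.List.slice order none (some k)) 0).foldl
      (fun (st : List (List String) × List (Int × Int)) p =>
        (st.1 ++ [[p.2]], pvInsort st.2 (PySem.Str.len p.2, p.1)))
      ([], [])
  -- for s in order[k:]: tot, i = queue.pop(0); out[i].append(s); _insort(queue, (tot+len(s), i))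
  -- (pvStepB above is the loop body)
  let st2 := (PySem.List.slice order (some k) none).foldl pvStepB (st1.1, st1.2)
  st2.1

-- ===== PRECONDITION & SPEC =====
-- Pre_ excludes exactly the inputs on which A raises (ValueError: min() of an empty
-- sequence — a nonempty region list with npartitions = 0 or npartitions ≤ -len(regions),
-- where the seeding slice is empty but the loop is not); A returns on everything else.
def Pre_greedy_partition (regions : List String) (npartitions : Int) (partition : Int) : Prop :=
  regions = [] ∨ (npartitions ≠ 0 ∧ -(regions.length : Int) < npartitions)

instance (regions : List String) (npartitions : Int) (partition : Int) : Decidable (Pre_greedy_partition regions npartitions partition) := by unfold Pre_greedy_partition; infer_instance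

def pvWitness_greedy_partition : List String × Int × Int := (["chr1", "chr2222", "x"], 2, 0)

def Spec_greedy_partition (regions : List String) (npartitions : Int) (partition : Int) (out : List (List String)) : Prop := out = greedy_partition_alt regions npartitions partition
instance (regions : List String) (npartitions : Int) (partition : Int) (out : List (List String)) : Decidable (Spec_greedy_partition regions npartitions partition out) := by unfold Spec_greedy_partition; infer_instance

-- ===== CLAIM (what is proved, stated in full; the proofs are below) =====
def Claim_equal_greedy_partition : Prop := ∀ (regions : List String) (npartitions : Int) (partition : Int), Dom_greedy_partition regions npartitions partition → Pre_greedy_partition regions npartitions partition → Spec_greedy_partition regions npartitions partition (greedy_partition regions npartitions partition)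

-- ===== LEMMAS AND PROOFS =====

-- ---- generic facts about the lexicographic pair order ----

-- Python tuple comparison (t, i) < (t', i') on int pairs (the if-condition of pvInsort)
def pvPairLt (a b : Int × Int) : Prop := a.1 < b.1 ∨ (a.1 = b.1 ∧ a.2 < b.2)

theorem pvPairLt_irrefl (a : Int × Int) : ¬ pvPairLt a a := by
  unfold pvPairLt; omega

theorem pvPairLt_trans {a b c : Int × Int} (h1 : pvPairLt a b) (h2 : pvPairLt b c) : pvPairLt a c := by
  unfold pvPairLt at *; omega

theorem pvPairLt_total (a b : Int × Int) (hne : b ≠ a) (h : ¬ pvPairLt b a) : pvPairLt a b := by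
  rcases a with ⟨a1, a2⟩; rcases b with ⟨b1, b2⟩
  have hne' : ¬(b1 = a1 ∧ b2 = a2) := by
    intro hc; exact hne (by rw [hc.1, hc.2])
  have h' : ¬(b1 < a1 ∨ (b1 = a1 ∧ b2 < a2)) := h
  show a1 < b1 ∨ (a1 = b1 ∧ a2 < b2)
  omega

-- ---- facts about pvInsort ----

theorem mem_pvInsort (q : List (Int × Int)) (item p : Int × Int) :
    p ∈ pvInsort q item ↔ p = item ∨ p ∈ q := by
  induction q with
  | nil => simp [pvInsort]
  | cons y ys ih =>
    simp only [pvInsort]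
    split
    · simp only [List.mem_cons, ih]; tauto
    · simp only [List.mem_cons]

theorem pairwise_pvInsort (q : List (Int × Int)) (item : Int × Int)
    (hq : q.Pairwise pvPairLt) (hni : ∀ y ∈ q, y ≠ item) :
    (pvInsort q item).Pairwise pvPairLt := by
  induction q with
  | nil => simp [pvInsort]
  | cons y ys ih =>
    rw [List.pairwise_cons] at hq
    simp only [pvInsort]
    split
    · rename_i hlt
      rw [List.pairwise_cons]
      refine ⟨?_, ih hq.2 (fun z hz => hni z (List.mem_cons_of_mem _ hz))⟩
      intro z hz
      rcases (mem_pvInsort ys item z).mp hz with h | h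
      · subst h; exact hlt
      · exact hq.1 z h
    · rename_i hnlt
      rw [List.pairwise_cons]
      have hy : pvPairLt item y :=
        pvPairLt_total item y (hni y (List.mem_cons_self)) hnlt
      refine ⟨?_, List.pairwise_cons.mpr hq⟩
      intro z hz
      rcases List.mem_cons.mp hz with h | h
      · subst h; exact hy
      · exact pvPairLt_trans hy (hq.1 z h)

-- ---- the queue invariant: q is the strictly-sorted list of (total, index) pairs of xs ----

def pvInv (q : List (Int × Int)) (xs : List Int) : Prop :=
  q.Pairwise pvPairLt ∧
  ∀ p : Int × Int, p ∈ q ↔ ∃ j : Nat, ∃ h : j < xs.length, p = (xs[j], (j : Int))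

theorem pvInv_extend (q : List (Int × Int)) (xs : List Int) (v : Int) (h : pvInv q xs) :
    pvInv (pvInsort q (v, (xs.length : Int))) (xs ++ [v]) := by
  obtain ⟨hpw, hmem⟩ := h
  have hni : ∀ y ∈ q, y ≠ (v, (xs.length : Int)) := by
    intro y hy heq
    obtain ⟨j, hj, rfl⟩ := (hmem y).mp hy
    have : (j : Int) = (xs.length : Int) := congrArg Prod.snd heq
    omega
  constructor
  · exact pairwise_pvInsort q _ hpw hni
  · intro p
    rw [mem_pvInsort, hmem]
    constructor
    · rintro (rfl | ⟨j, hj, rfl⟩)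
      · have hl : xs.length < (xs ++ [v]).length := by simp
        exact ⟨xs.length, hl, by simp⟩
      · refine ⟨j, by simp; omega, ?_⟩
        rw [List.getElem_append_left hj]
    · rintro ⟨j, hj, rfl⟩
      by_cases hcase : j < xs.length
      · exact Or.inr ⟨j, hcase, by rw [List.getElem_append_left hcase]⟩
      · have hj' : j = xs.length := by simp at hj; omega
        subst hj'
        left
        simp
theorem pvInv_nil : pvInv [] [] := by
  constructor
  · exact List.Pairwise.nil
  · intro p; simp

-- ---- index? from an explicit first-occurrence description ----

theorem index?_of_getElem (xs : List Int) (v : Int) (i : Nat) (hi : i < xs.length)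
    (hv : xs[i] = v) (hfirst : ∀ j (hj : j < i), xs[j]'(by omega) ≠ v) :
    PySem.List.index? xs v = some i := by
  rw [PySem.List.index?_eq_some_iff]
  refine ⟨xs.take i, xs.drop (i + 1), ?_, ?_, ?_⟩
  · conv_lhs => rw [← List.take_append_drop i xs]
    rw [List.drop_eq_getElem_cons hi, hv]
  · simp [Nat.min_eq_left (Nat.le_of_lt hi)]
  · intro hmemv
    obtain ⟨j, hj, hje⟩ := List.mem_iff_getElem.mp hmemv
    have hj' : j < i := by simp at hj; omega
    exact hfirst j hj' (by rw [← hje, List.getElem_take])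

-- ---- the head of the queue is A's (min, first index of min) ----

theorem pvInv_head (q : List (Int × Int)) (xs : List Int) (hInv : pvInv q xs) (hne : xs ≠ []) :
    ∃ (i : Nat) (rest : List (Int × Int)) (hi : i < xs.length),
      q = (xs[i], (i : Int)) :: rest ∧
      (PySem.List.min? xs (fun x => x)).getD 0 = xs[i] ∧
      PySem.List.index? xs xs[i] = some i ∧
      rest.Pairwise pvPairLt ∧
      (∀ p : Int × Int, p ∈ rest ↔ ∃ j : Nat, ∃ h : j < xs.length, j ≠ i ∧ p = (xs[j], (j : Int))) := by
  obtain ⟨hpw, hmem⟩ := hInv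
  have hlen : 0 < xs.length := List.length_pos_iff.mpr hne
  have h0 : ((xs[0], (0 : Int)) : Int × Int) ∈ q := (hmem _).mpr ⟨0, hlen, rfl⟩
  obtain ⟨p, rest, rfl⟩ := List.exists_cons_of_ne_nil (List.ne_nil_of_mem h0)
  obtain ⟨i, hi, hp⟩ := (hmem p).mp List.mem_cons_self
  subst hp
  rw [List.pairwise_cons] at hpw
  have hheadle : ∀ j (hj : j < xs.length), xs[i] ≤ xs[j] := by
    intro j hj
    rcases List.mem_cons.mp ((hmem _).mpr ⟨j, hj, rfl⟩) with h | h
    · have := congrArg Prod.fst h; simpa using this.symm.le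
    · have := hpw.1 _ h
      unfold pvPairLt at this
      simp only at this
      omega
  -- the minimum of xs is xs[i]
  have hminval : (PySem.List.min? xs (fun x => x)).getD 0 = xs[i] := by
    obtain ⟨m, hm⟩ : ∃ m, PySem.List.min? xs (fun x => x) = some m := by
      rcases h : PySem.List.min? xs (fun x => x) with _ | m
      · exact absurd ((PySem.List.min?_eq_none_iff xs _).mp h) hne
      · exact ⟨m, rfl⟩
    have hmmem := PySem.List.min?_mem hm
    have hmin := PySem.List.min?_isMin (key := fun x => x) hm
    obtain ⟨jm, hjm, hjme⟩ := List.mem_iff_getElem.mp hmmem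
    have h1 : xs[i] ≤ m := by rw [← hjme]; exact hheadle jm hjm
    have h2 : m ≤ xs[i] := hmin _ (List.getElem_mem hi)
    rw [hm]
    simpa using le_antisymm h2 h1
  have hfirst : ∀ j (hj : j < i), xs[j]'(by omega) ≠ xs[i] := by
    intro j hj heq
    have hjlen : j < xs.length := by omega
    rcases List.mem_cons.mp ((hmem _).mpr ⟨j, hjlen, rfl⟩) with h | h
    · have := congrArg Prod.snd h; simp at this; omega
    · have := hpw.1 _ h
      unfold pvPairLt at this
      simp only [heq] at this
      omega
  refine ⟨i, rest, hi, rfl, hminval, index?_of_getElem xs xs[i] i hi rfl hfirst, hpw.2, ?_⟩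
  intro p
  constructor
  · intro hp
    obtain ⟨j, hj, rfl⟩ := (hmem _).mp (List.mem_cons_of_mem _ hp)
    refine ⟨j, hj, ?_, rfl⟩
    intro hji
    subst hji
    exact pvPairLt_irrefl _ (hpw.1 _ hp)
  · rintro ⟨j, hj, hji, rfl⟩
    rcases List.mem_cons.mp ((hmem _).mpr ⟨j, hj, rfl⟩) with h | h
    · have := congrArg Prod.snd h; simp at this; omega
    · exact h

-- ---- the invariant survives one round of pop + insort ----

theorem pvInv_step (rest : List (Int × Int)) (xs : List Int) (i : Nat) (hi : i < xs.length)
    (d : Int)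
    (hpw : rest.Pairwise pvPairLt)
    (hmem : ∀ p : Int × Int, p ∈ rest ↔ ∃ j : Nat, ∃ h : j < xs.length, j ≠ i ∧ p = (xs[j], (j : Int))) :
    pvInv (pvInsort rest (xs[i] + d, (i : Int))) (xs.set i (xs[i] + d)) := by
  have hni : ∀ y ∈ rest, y ≠ (xs[i] + d, (i : Int)) := by
    intro y hy heq
    obtain ⟨j, hj, hji, rfl⟩ := (hmem y).mp hy
    have := congrArg Prod.snd heq
    simp at this
    omega
  constructor
  · exact pairwise_pvInsort rest _ hpw hni
  · intro p
    rw [mem_pvInsort, hmem]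
    constructor
    · rintro (rfl | ⟨j, hj, hji, rfl⟩)
      · refine ⟨i, by simpa using hi, ?_⟩
        rw [List.getElem_set_self]
      · refine ⟨j, by simpa using hj, ?_⟩
        rw [List.getElem_set_ne (by omega)]
    · rintro ⟨j, hj, rfl⟩
      have hj' : j < xs.length := by simpa using hj
      by_cases hji : j = i
      · subst hji
        left
        rw [List.getElem_set_self]
      · right
        refine ⟨j, hj', hji, ?_⟩
        rw [List.getElem_set_ne (by omega)]

-- ---- the two loops agree ----

theorem pvLoop_eq (rest : List String) :
    ∀ (out : List (List String)) (xs : List Int) (q : List (Int × Int)),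
      pvInv q xs → (rest ≠ [] → xs ≠ []) →
      (rest.foldl pvStepA (out, xs)).1 = (rest.foldl pvStepB (out, q)).1 := by
  induction rest with
  | nil => intro out xs q _ _; rfl
  | cons s rest ih =>
    intro out xs q hInv hne
    have hxs : xs ≠ [] := hne (by simp)
    obtain ⟨i, restq, hi, rfl, hminval, hidx, hpwr, hmemr⟩ := pvInv_head q xs hInv hxs
    simp only [List.foldl_cons]
    have hA : pvStepA (out, xs) s =
        (PySem.List.pySetD out (i : Int) (PySem.List.pyGetD out (i : Int) [] ++ [s]),
         xs.set i (xs[i] + PySem.Str.len s)) := by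
      simp only [pvStepA, hminval, hidx, Option.getD_some, PySem.List.pySetD_natCast,
        PySem.List.pyGetD_natCast, Prod.mk.injEq]
      refine ⟨trivial, ?_⟩
      rw [List.getD_eq_getElem xs 0 hi]
    have hB : pvStepB (out, (xs[i], (i : Int)) :: restq) s =
        (PySem.List.pySetD out (i : Int) (PySem.List.pyGetD out (i : Int) [] ++ [s]),
         pvInsort restq (xs[i] + PySem.Str.len s, (i : Int))) := by
      simp only [pvStepB, List.headD_cons, List.tail_cons]
    rw [hA, hB]
    exact ih _ _ _ (pvInv_step restq xs i hi _ hpwr hmemr)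
      (fun _ => by simpa using hxs)

-- ---- the seeding loop of B: outputs and invariant ----

theorem pvSeed_loop (ss : List String) :
    ∃ q : List (Int × Int),
      (PySem.List.enumerate ss 0).foldl
        (fun (st : List (List String) × List (Int × Int)) p =>
          (st.1 ++ [[p.2]], pvInsort st.2 (PySem.Str.len p.2, p.1))) ([], [])
        = (ss.map (fun s => [s]), q) ∧
      pvInv q (ss.map (fun s => PySem.Str.len s)) := by
  induction ss using List.reverseRecOn with
  | nil => exact ⟨[], rfl, pvInv_nil⟩
  | append_singleton ss s ih =>
    obtain ⟨q, hfold, hinv⟩ := ih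
    refine ⟨pvInsort q (PySem.Str.len s, (ss.length : Int)), ?_, ?_⟩
    · rw [PySem.List.enumerate_append, List.foldl_append, hfold]
      simp
    · have := pvInv_extend q (ss.map (fun s => PySem.Str.len s)) (PySem.Str.len s) hinv
      simpa using this

-- ---- slices as take/drop of a clamped cut point ----

theorem pvClampIdx_min (n : Nat) (i : Int) :
    PySem.List.clampIdx n (min i (n : Int)) = PySem.List.clampIdx n i := by
  unfold PySem.List.clampIdx
  split_ifs <;> omega

theorem pvSlice_none_some {α : Type} (xs : List α) (i : Int) :
    PySem.List.slice xs none (some i) = xs.take (PySem.List.clampIdx xs.length i) := by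
  show List.take (PySem.List.clampIdx xs.length i - 0) (List.drop 0 xs) = _
  simp

theorem pvSlice_some_none {α : Type} (xs : List α) (i : Int) :
    PySem.List.slice xs (some i) none = xs.drop (PySem.List.clampIdx xs.length i) := by
  show List.take (xs.length - PySem.List.clampIdx xs.length i)
      (List.drop (PySem.List.clampIdx xs.length i) xs) = _
  exact List.take_of_length_le (by simp)

theorem pvSlice_some_len {α : Type} (xs : List α) (i : Int) :
    PySem.List.slice xs (some i) (some (xs.length : Int)) =
      xs.drop (PySem.List.clampIdx xs.length i) := by
  have hlen : PySem.List.clampIdx xs.length (xs.length : Int) = xs.length := by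
    unfold PySem.List.clampIdx; split <;> omega
  show List.take (PySem.List.clampIdx xs.length (xs.length : Int) - PySem.List.clampIdx xs.length i)
      (List.drop (PySem.List.clampIdx xs.length i) xs) = _
  rw [hlen]
  exact List.take_of_length_le (by simp)

theorem pvMap_slice {α β : Type} (g : α → β) (xs : List α) (a? b? : Option Int) :
    (PySem.List.slice xs a? b?).map g = PySem.List.slice (xs.map g) a? b? := by
  simp [PySem.List.slice]

-- ---- mapping a function through the reverse stable sort ----

theorem pvMap_insertBy {α β κ : Type} [LT κ] [DecidableLT κ] (g : α → β) (key : β → κ)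
    (key' : α → κ) (hk : ∀ x, key' x = key (g x)) (x : α) (acc : List α) :
    (PySem.List.insertBy (fun a b => decide (key' b < key' a)) x acc).map g =
      PySem.List.insertBy (fun (a b : β) => decide (key b < key a)) (g x) (acc.map g) := by
  induction acc with
  | nil => simp [PySem.List.insertBy]
  | cons y ys ih =>
    simp only [PySem.List.insertBy, hk, List.map_cons]
    split <;> simp_all

theorem pvMap_foldl_insertBy {α β κ : Type} [LT κ] [DecidableLT κ] (g : α → β) (key : β → κ)
    (key' : α → κ) (hk : ∀ x, key' x = key (g x)) (xs : List α) :
    ∀ acc : List α,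
      (xs.foldl (fun acc x => PySem.List.insertBy (fun a b => decide (key' b < key' a)) x acc) acc).map g =
        (xs.map g).foldl (fun acc y => PySem.List.insertBy (fun a b => decide (key b < key a)) y acc) (acc.map g) := by
  induction xs with
  | nil => intro acc; rfl
  | cons x xs ih =>
    intro acc
    simp only [List.foldl_cons, List.map_cons]
    rw [ih, pvMap_insertBy g key key' hk]

theorem pvMap_sorted_rev {α β κ : Type} [LT κ] [DecidableLT κ] (g : α → β) (key : β → κ)
    (key' : α → κ) (hk : ∀ x, key' x = key (g x)) (xs : List α) :
    (PySem.List.sorted xs key' true).map g = PySem.List.sorted (xs.map g) key true := by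
  rw [PySem.List.sorted_rev_eq_foldl_insertBy, PySem.List.sorted_rev_eq_foldl_insertBy]
  simpa using pvMap_foldl_insertBy g key key' hk xs []




theorem pvSlice_some_len' {α : Type} (xs : List α) (i : Int) (m : Nat) (hm : m = xs.length) :
    PySem.List.slice xs (some i) (some (m : Int)) = xs.drop (PySem.List.clampIdx xs.length i) := by
  subst hm; exact pvSlice_some_len xs i

theorem pvClampIdx_min' (n : Nat) (i : Int) (m : Nat) (hm : m = n) :
    PySem.List.clampIdx n (min i (m : Int)) = PySem.List.clampIdx n i := by
  rw [hm]; exact pvClampIdx_min n i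

-- ===== VERDICT (by name: the statement is the Claim_ definition above) =====
theorem greedy_partition_spec : Claim_equal_greedy_partition := by
  intro regions np p _ hpre
  unfold Spec_greedy_partition
  have horder_len : (PySem.List.sorted regions (fun s => PySem.Str.len s) true).length
      = regions.length := PySem.List.length_sorted regions _ true
  have hrange : (PySem.List.pyRange 0 ((regions.length : Int)) 1).map
      (fun j => PySem.List.pyGetD regions j "") = regions := by
    simpa using PySem.List.map_pyGetD_pyRange_zero' regions ""
  have hixmap : (PySem.List.sorted (PySem.List.pyRange 0 ((regions.length : Int)) 1)
      (fun k => PySem.Str.len (PySem.List.pyGetD regions k "")) true).map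
        (fun j => PySem.List.pyGetD regions j "")
      = PySem.List.sorted regions (fun s => PySem.Str.len s) true := by
    rw [pvMap_sorted_rev (fun j => PySem.List.pyGetD regions j "") (fun s => PySem.Str.len s)
      (fun k => PySem.Str.len (PySem.List.pyGetD regions k "")) (fun x => rfl), hrange]
  have hcomp : (fun i => [PySem.List.pyGetD regions i ""])
      = (fun s : String => [s]) ∘ (fun j => PySem.List.pyGetD regions j "") := rfl
  have hlen2 : ((fun r => PySem.Str.len (PySem.List.pyGetD r 0 "")) ∘ (fun s : String => [s]))
      = fun s => PySem.Str.len s := by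
    funext s; simp [PySem.List.pyGetD_zero_cons]
  obtain ⟨q0, hfold, hinv⟩ := pvSeed_loop
    ((PySem.List.sorted regions (fun s => PySem.Str.len s) true).take
      (PySem.List.clampIdx (PySem.List.sorted regions (fun s => PySem.Str.len s) true).length np))
  have hout0 : (PySem.List.slice (PySem.List.sorted (PySem.List.pyRange 0 ((regions.length : Int)) 1)
        (fun k => PySem.Str.len (PySem.List.pyGetD regions k "")) true) (some 0) (some np)).map
        (fun i => [PySem.List.pyGetD regions i ""])
      = ((PySem.List.sorted regions (fun s => PySem.Str.len s) true).take
          (PySem.List.clampIdx (PySem.List.sorted regions (fun s => PySem.Str.len s) true).length np)).map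
          (fun s : String => [s]) := by
    rw [hcomp, ← List.map_map, pvMap_slice, hixmap, PySem.List.slice_zero_start, pvSlice_none_some]
  have houtlen : (((PySem.List.sorted regions (fun s => PySem.Str.len s) true).take
        (PySem.List.clampIdx (PySem.List.sorted regions (fun s => PySem.Str.len s) true).length np)).map
        (fun s : String => [s])).map (fun r => PySem.Str.len (PySem.List.pyGetD r 0 ""))
      = ((PySem.List.sorted regions (fun s => PySem.Str.len s) true).take
          (PySem.List.clampIdx (PySem.List.sorted regions (fun s => PySem.Str.len s) true).length np)).map
          (fun s => PySem.Str.len s) := by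
    rw [List.map_map, hlen2]
  have hrestA : (PySem.List.slice (PySem.List.sorted (PySem.List.pyRange 0 ((regions.length : Int)) 1)
        (fun k => PySem.Str.len (PySem.List.pyGetD regions k "")) true) (some np)
        (some ((regions.length : Int)))).map (fun j => PySem.List.pyGetD regions j "")
      = (PySem.List.sorted regions (fun s => PySem.Str.len s) true).drop
          (PySem.List.clampIdx (PySem.List.sorted regions (fun s => PySem.Str.len s) true).length np) := by
    rw [pvMap_slice, hixmap,
      pvSlice_some_len' (PySem.List.sorted regions (fun s => PySem.Str.len s) true) np
        regions.length horder_len.symm]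
  have hseedB : PySem.List.slice (PySem.List.sorted regions (fun s => PySem.Str.len s) true) none
        (some (min np ((regions.length : Int))))
      = (PySem.List.sorted regions (fun s => PySem.Str.len s) true).take
          (PySem.List.clampIdx (PySem.List.sorted regions (fun s => PySem.Str.len s) true).length np) := by
    rw [pvSlice_none_some,
      pvClampIdx_min' (PySem.List.sorted regions (fun s => PySem.Str.len s) true).length np
        regions.length horder_len.symm]
  have hrestB : PySem.List.slice (PySem.List.sorted regions (fun s => PySem.Str.len s) true)
        (some (min np ((regions.length : Int)))) none
      = (PySem.List.sorted regions (fun s => PySem.Str.len s) true).drop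
          (PySem.List.clampIdx (PySem.List.sorted regions (fun s => PySem.Str.len s) true).length np) := by
    rw [pvSlice_some_none,
      pvClampIdx_min' (PySem.List.sorted regions (fun s => PySem.Str.len s) true).length np
        regions.length horder_len.symm]
  simp only [greedy_partition, greedy_partition_alt, PySem.List.len_eq,
    PySem.List.length_sorted, PySem.List.length_pyRange_one, Int.sub_zero, Int.toNat_natCast]
  rw [← List.foldl_map (f := fun j : Int => PySem.List.pyGetD regions j "") (g := pvStepA)]
  rw [hout0, houtlen, hrestA, hseedB, hrestB, hfold]
  refine pvLoop_eq _ _ _ _ hinv ?_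
  intro hd hm
  rw [List.map_eq_nil_iff, List.take_eq_nil_iff] at hm
  have hdl : PySem.List.clampIdx
      (PySem.List.sorted regions (fun s => PySem.Str.len s) true).length np
      < (PySem.List.sorted regions (fun s => PySem.Str.len s) true).length := by
    by_contra hge
    push Not at hge
    exact hd (List.drop_eq_nil_of_le hge)
  rcases hm with hm | hm
  · generalize (PySem.List.sorted regions (fun s => PySem.Str.len s) true).length = L
      at hdl hm horder_len
    subst horder_len
    rcases hpre with hnil | ⟨hnz, hlb⟩
    · subst hnil
      simp only [List.length_nil] at hdl
      exact absurd hdl (Nat.not_lt_zero _)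
    · unfold PySem.List.clampIdx at hdl hm
      split_ifs at hdl hm <;> omega
  · rw [hm] at hd
    simp at hd
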